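-- pv_equiv track=rewrite | github.com/Tialo/sysan | task5/task.py | agreed_cluster_range
-- ===== SOURCE A (Python) =====
-- def matr_op(a, b, op):
--     n = len(a)
--     res = []
--     for i in range(n):
--         l = []
--         for j in range(n):
--             l.append(a[i][j] + b[i][j] if op == "+" else a[i][j] * b[i][j])
--         res.append(l)
--     return res
--
-- def agreed_cluster_range(A, B):
--     A_T = list(map(list, zip(*A)))
--     B_T = list(map(list, zip(*B)))
--     AB = matr_op(A, B, "*")
--     A_T_B_T = matr_op(A_T, B_T, "*")
--     summ_matr = matr_op(AB, A_T_B_T, "+")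
--
--     ans = []
--     for i in range(len(A)):
--         for j in range(i):
--             if summ_matr[i][j] == 0:
--                 ans.append((i, j))
--     return ans
-- ===== SOURCE B (Python) =====
-- def agreed_cluster_range(A, B):
--     # Single pass over the lower triangle; no transposes or intermediate matrices.
--     return [(i, j) for i in range(len(A)) for j in range(i)
--             if A[i][j]*B[i][j] + A[j][i]*B[j][i] == 0]
-- ===== Notes on version B (the rewrite author's own statement) =====
-- stated objective: simpler
-- what changed: Replaces the two transpose constructions and three full matr_op passes (two products, one sum) by one comprehension over the lower triangle computing A[i][j]*B[i][j]+A[j][i]*B[j][i] inline.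
import Mathlib
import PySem

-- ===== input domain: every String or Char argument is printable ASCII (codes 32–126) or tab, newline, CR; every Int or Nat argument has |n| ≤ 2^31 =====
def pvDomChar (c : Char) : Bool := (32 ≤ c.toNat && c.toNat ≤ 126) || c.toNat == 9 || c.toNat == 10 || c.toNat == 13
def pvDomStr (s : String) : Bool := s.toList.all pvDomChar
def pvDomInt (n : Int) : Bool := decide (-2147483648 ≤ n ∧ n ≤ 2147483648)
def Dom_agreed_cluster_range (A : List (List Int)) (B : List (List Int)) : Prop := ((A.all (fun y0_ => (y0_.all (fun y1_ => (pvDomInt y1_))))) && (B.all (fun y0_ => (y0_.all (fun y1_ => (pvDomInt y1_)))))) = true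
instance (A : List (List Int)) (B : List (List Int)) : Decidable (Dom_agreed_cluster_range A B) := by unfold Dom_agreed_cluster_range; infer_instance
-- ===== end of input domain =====

-- B replaces A's transposes and three matr_op passes by one inline pass over the lower triangle (objective: simpler).
-- ===== PORT A =====
-- zip(*xss) followed by list(map(list, ...)): rows = the first m columns, m = min row length (0 for [])
def pvTranspose (xss : List (List Int)) : List (List Int) :=
  (List.range ((xss.map List.length).min?.getD 0)).map (fun j => xss.map (fun r => r.getD j 0))

def matr_op (a : List (List Int)) (b : List (List Int)) (op : String) : List (List Int) :=
  (List.range a.length).map (fun i =>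
    (List.range a.length).map (fun j =>
      if op == "+" then (a.getD i []).getD j 0 + (b.getD i []).getD j 0
      else (a.getD i []).getD j 0 * (b.getD i []).getD j 0))

def agreed_cluster_range (A : List (List Int)) (B : List (List Int)) : List (Int × Int) :=
  let A_T := pvTranspose A
  let B_T := pvTranspose B
  let AB := matr_op A B "*"
  let A_T_B_T := matr_op A_T B_T "*"
  let summ_matr := matr_op AB A_T_B_T "+"
  (List.range A.length).foldl (fun ans i =>
    (List.range i).foldl (fun ans j =>
      if (summ_matr.getD i []).getD j 0 = 0 then ans ++ [((i : Int), (j : Int))] else ans) ans) []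

-- ===== PORT B =====
def agreed_cluster_range_alt (A : List (List Int)) (B : List (List Int)) : List (Int × Int) :=
  (List.range A.length).flatMap (fun i =>
    ((List.range i).filter (fun j =>
      decide ((A.getD i []).getD j 0 * (B.getD i []).getD j 0
            + (A.getD j []).getD i 0 * (B.getD j []).getD i 0 = 0))).map
      (fun (j : Nat) => ((i : Int), (j : Int))))

-- ===== PRECONDITION & SPEC =====
-- Pre_ is exactly the set of inputs on which the Python A returns normally: either A is empty, or
-- every row of A has length >= len(A) with at least one of length exactly len(A) (otherwise the
-- transposed product raises IndexError), and B has at least len(A) rows, all of length >= len(A).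
def Pre_agreed_cluster_range (A : List (List Int)) (B : List (List Int)) : Prop :=
  A.length = 0 ∨
    ((∀ r ∈ A, A.length ≤ r.length) ∧ (∃ r ∈ A, r.length = A.length) ∧
     A.length ≤ B.length ∧ (∀ r ∈ B, A.length ≤ r.length))
instance (A : List (List Int)) (B : List (List Int)) : Decidable (Pre_agreed_cluster_range A B) := by
  unfold Pre_agreed_cluster_range; infer_instance

def pvWitness_agreed_cluster_range : List (List Int) × List (List Int) :=
  ([[1, 2], [3, 4]], [[1, 0], [0, 1]])

def Spec_agreed_cluster_range (A : List (List Int)) (B : List (List Int)) (out : List (Int × Int)) : Prop := out = agreed_cluster_range_alt A B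
instance (A : List (List Int)) (B : List (List Int)) (out : List (Int × Int)) : Decidable (Spec_agreed_cluster_range A B out) := by unfold Spec_agreed_cluster_range; infer_instance

-- ===== CLAIM (what is proved, stated in full; the proofs are below) =====
def Claim_equal_agreed_cluster_range : Prop := ∀ (A : List (List Int)) (B : List (List Int)), Dom_agreed_cluster_range A B → Pre_agreed_cluster_range A B → Spec_agreed_cluster_range A B (agreed_cluster_range A B)

-- ===== LEMMAS AND PROOFS =====
theorem pv_getD_range_map {α : Type} (f : Nat → α) (d : α) (i n : Nat) (h : i < n) :
    ((List.range n).map f).getD i d = f i := by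
  simp [List.getD_eq_getElem?_getD, h]

theorem pv_getD_map_getD (A : List (List Int)) (g : List Int → Int) (j : Nat) (hj : j < A.length) :
    (A.map g).getD j 0 = g (A.getD j []) := by
  simp [List.getD_eq_getElem?_getD, List.getElem?_map, List.getElem?_eq_getElem hj]

theorem pv_min_ge (n : Nat) : ∀ (l : List Nat), (∀ x ∈ l, n ≤ x) → l ≠ [] → n ≤ l.min?.getD 0 := by
  intro l
  induction l with
  | nil => intro _ hne; exact absurd rfl hne
  | cons x t ih =>
    intro h _
    simp only [List.min?_cons, Option.getD_some]
    cases ht : t.min? with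
    | none => simpa [Option.elim] using h x (by simp)
    | some m =>
      have htne : t ≠ [] := by rintro rfl; simp [List.min?] at ht
      have hm : n ≤ m := by
        have := ih (fun y hy => h y (by simp [hy])) htne
        rwa [ht, Option.getD_some] at this
      simpa [Option.elim] using le_min (h x (by simp)) hm

-- n ≤ min row length, when A is nonempty with all rows of length ≥ n
theorem pv_min_len_ge (A : List (List Int)) (n : Nat) (hne : A ≠ [])
    (h : ∀ r ∈ A, n ≤ r.length) : n ≤ ((A.map List.length).min?.getD 0) :=
  pv_min_ge n (A.map List.length)
    (by intro y hy; obtain ⟨r, hr, rfl⟩ := List.mem_map.mp hy; exact h r hr)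
    (by intro e; exact hne (List.map_eq_nil_iff.mp e))

theorem pv_transpose_get (A : List (List Int)) (i j : Nat)
    (hi : i < (A.map List.length).min?.getD 0) (hj : j < A.length) :
    ((pvTranspose A).getD i []).getD j 0 = (A.getD j []).getD i 0 := by
  unfold pvTranspose
  rw [pv_getD_range_map _ _ _ _ hi, pv_getD_map_getD _ _ _ hj]

theorem pv_matr_op_get (a b : List (List Int)) (op : String) (i j : Nat)
    (hi : i < a.length) (hj : j < a.length) :
    ((matr_op a b op).getD i []).getD j 0 =
      if op == "+" then (a.getD i []).getD j 0 + (b.getD i []).getD j 0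
      else (a.getD i []).getD j 0 * (b.getD i []).getD j 0 := by
  unfold matr_op
  rw [pv_getD_range_map _ _ _ _ hi, pv_getD_range_map _ _ _ _ hj]

theorem pv_matr_op_length (a b : List (List Int)) (op : String) :
    (matr_op a b op).length = a.length := by simp [matr_op]

-- entrywise value of A's summ matrix on the admitted inputs
theorem pv_summ_entry (A B : List (List Int))
    (h1 : ∀ r ∈ A, A.length ≤ r.length) (h3 : A.length ≤ B.length)
    (h4 : ∀ r ∈ B, A.length ≤ r.length)
    (i j : Nat) (hi : i < A.length) (hj : j < A.length) :
    ((matr_op (matr_op A B "*") (matr_op (pvTranspose A) (pvTranspose B) "*") "+").getD i []).getD j 0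
      = (A.getD i []).getD j 0 * (B.getD i []).getD j 0
      + (A.getD j []).getD i 0 * (B.getD j []).getD i 0 := by
  have hAne : A ≠ [] := by intro h; rw [h] at hi; simp at hi
  have hBne : B ≠ [] := by
    intro h; rw [h] at h3
    have h0 : A.length = 0 := Nat.le_zero.mp (by simpa using h3)
    omega
  have hmA : A.length ≤ (A.map List.length).min?.getD 0 := pv_min_len_ge A A.length hAne h1
  have hmB : A.length ≤ (B.map List.length).min?.getD 0 := pv_min_len_ge B A.length hBne h4
  have hTA : (pvTranspose A).length = (A.map List.length).min?.getD 0 := by simp [pvTranspose]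
  have hi' : i < (matr_op A B "*").length := by rw [pv_matr_op_length]; exact hi
  have hj' : j < (matr_op A B "*").length := by rw [pv_matr_op_length]; exact hj
  rw [pv_matr_op_get _ _ "+" i j hi' hj']
  have hiT : i < (pvTranspose A).length := by rw [hTA]; exact lt_of_lt_of_le hi hmA
  have hjT : j < (pvTranspose A).length := by rw [hTA]; exact lt_of_lt_of_le hj hmA
  rw [pv_matr_op_get A B "*" i j hi hj, pv_matr_op_get _ _ "*" i j hiT hjT]
  rw [pv_transpose_get A i j (lt_of_lt_of_le hi hmA) hj,
      pv_transpose_get B i j (lt_of_lt_of_le hi hmB) (lt_of_lt_of_le hj h3)]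
  simp

-- ===== VERDICT (by name: the statement is the Claim_ definition above) =====
theorem agreed_cluster_range_spec : Claim_equal_agreed_cluster_range := by
  intro A B _ hpre
  unfold Spec_agreed_cluster_range agreed_cluster_range agreed_cluster_range_alt
  rcases hpre with h0 | ⟨h1, _, h3, h4⟩
  · simp [h0]
  · rw [PySem.List.foldl_congr_mem (g := fun ans i =>
      ans ++ ((List.range i).filter (fun j =>
        decide ((A.getD i []).getD j 0 * (B.getD i []).getD j 0
              + (A.getD j []).getD i 0 * (B.getD j []).getD i 0 = 0))).map
        (fun (j : Nat) => ((i : Int), (j : Int))))]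
    · rw [PySem.List.foldl_append_eq_flatMap]; simp
    · intro acc i hi
      rw [PySem.List.foldl_append_ite]
      refine congrArg (fun l : List Nat => acc ++ l.map (fun (j : Nat) => ((i : Int), (j : Int)))) (List.filter_congr ?_)
      intro j hj
      have hi' : i < A.length := List.mem_range.mp hi
      have hj' : j < A.length := lt_trans (List.mem_range.mp hj) hi'
      rw [pv_summ_entry A B h1 h3 h4 i j hi' hj']
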